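-- pv_equiv track=rewrite | github.com/p3dr0vsky/pyforca | desafios_do_pai.py | substitui
-- ===== SOURCE A (Python) =====
-- def posicoes(c, p):
--     lista = list()
--     for x in range(len(p)):
--         if c == p[x]:
--             lista.append(x)
--     return lista
--
-- def repete(c, nr):
--     lista = list()
--     for i in range(nr):
--         lista.append(c)
--     return lista
--
-- def substitui(p, c, string=False):
--     pos = posicoes(c, p)
--     u = repete('_', len(p))
--     for x in pos:
--         u[x] = c
--     if string:
--         u = "".join(u)
--     return u
-- ===== SOURCE B (Python) =====
-- def substitui(p, c, string=False):
--     u = [c if ch == c else '_' for ch in p]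
--     if string:
--         u = "".join(u)
--     return u
-- ===== Notes on version B (the rewrite author's own statement) =====
-- stated objective: simpler
-- what changed: Single pass mapping each character to c or '_' directly, replacing A's three-phase pipeline (collect match positions, build an underscore list, assign at each position).
-- outside the precondition, e.g. on substitui(['a', 'b'], 'a', True): A returns 'a_', B returns 'a_'
import Mathlib
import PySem

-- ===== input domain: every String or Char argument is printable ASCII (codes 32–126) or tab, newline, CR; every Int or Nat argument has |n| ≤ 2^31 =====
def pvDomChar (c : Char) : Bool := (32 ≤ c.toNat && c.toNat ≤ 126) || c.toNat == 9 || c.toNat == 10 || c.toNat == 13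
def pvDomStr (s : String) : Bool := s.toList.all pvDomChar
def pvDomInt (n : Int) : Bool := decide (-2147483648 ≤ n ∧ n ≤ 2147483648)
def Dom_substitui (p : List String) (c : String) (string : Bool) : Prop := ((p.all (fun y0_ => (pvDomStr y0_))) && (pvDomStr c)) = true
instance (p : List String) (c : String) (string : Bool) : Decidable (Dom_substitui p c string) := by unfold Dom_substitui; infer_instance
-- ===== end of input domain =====

-- B replaces A's positions-index-then-assign pipeline with one direct map over p (objective: simpler).
-- Equivalence is about the returned list; with string=True Python returns a joined str, excluded by Pre_.


-- ===== PORT A =====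
-- for x in range(len(p)): if c == p[x]: lista.append(x)   (indices are 0..len-1, so Nat range is exact)
def posicoes (c : String) (p : List String) : List Nat :=
  (List.range p.length).foldl (fun lista x => if some c == p[x]? then lista ++ [x] else lista) []

-- for i in range(nr): lista.append(c)
def repete (c : String) (nr : Nat) : List String :=
  (List.range nr).foldl (fun lista _ => lista ++ [c]) []

def substitui (p : List String) (c : String) (string : Bool) : List String :=
  let pos := posicoes c p
  let u := repete "_" p.length
  let u := pos.foldl (fun u x => u.set x c) u
  -- 'if string: u = "".join(u)' returns a str, which is outside the declared List String type;
  -- those inputs are excluded by Pre_substitui, so the branch is omitted here.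
  u

-- ===== PORT B =====
def substitui_alt (p : List String) (c : String) (string : Bool) : List String :=
  p.map (fun ch => if ch == c then c else "_")

-- ===== PRECONDITION & SPEC =====
-- Pre_ excludes string = true, on which A returns a joined str — a value outside the declared
-- return type List String (B does the same there; the equivalence claimed is about the list case).
def Pre_substitui (p : List String) (c : String) (string : Bool) : Prop := string = false
instance (p : List String) (c : String) (string : Bool) : Decidable (Pre_substitui p c string) := by unfold Pre_substitui; infer_instance
def pvWitness_substitui : List String × String × Bool := (["a", "b", "a"], "a", false)

def Spec_substitui (p : List String) (c : String) (string : Bool) (out : List String) : Prop := out = substitui_alt p c string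
instance (p : List String) (c : String) (string : Bool) (out : List String) : Decidable (Spec_substitui p c string out) := by unfold Spec_substitui; infer_instance

-- ===== CLAIM (what is proved, stated in full; the proofs are below) =====
def Claim_equal_substitui : Prop := ∀ (p : List String) (c : String) (string : Bool), Dom_substitui p c string → Pre_substitui p c string → Spec_substitui p c string (substitui p c string)

-- ===== LEMMAS AND PROOFS =====
theorem posicoes_eq_filter (c : String) (p : List String) :
    posicoes c p = (List.range p.length).filter (fun x => some c == p[x]?) := by
  unfold posicoes
  rw [PySem.List.foldl_append_if_eq_filter]
  simp

theorem repete_eq_replicate (c : String) (nr : Nat) :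
    repete c nr = List.replicate nr c := by
  unfold repete
  induction nr with
  | zero => simp
  | succ n ih => rw [List.range_succ, List.foldl_append, ih, List.replicate_succ']; simp

theorem foldl_set_get? (l : List Nat) (c : String) (u : List String) (i : Nat) :
    (l.foldl (fun u x => u.set x c) u)[i]? =
      if i ∈ l ∧ i < u.length then some c else u[i]? := by
  induction l generalizing u with
  | nil => simp
  | cons x l ih =>
    rw [List.foldl_cons, ih, List.getElem?_set]
    simp only [List.length_set, List.mem_cons]
    split_ifs <;> simp_all

-- ===== VERDICT (by name: the statement is the Claim_ definition above) =====
theorem substitui_spec : Claim_equal_substitui := by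
  intro p c string _ _
  unfold Spec_substitui substitui substitui_alt
  simp only
  apply List.ext_getElem?
  intro i
  rw [foldl_set_get?, repete_eq_replicate, posicoes_eq_filter]
  simp only [List.length_replicate, List.mem_filter, List.mem_range]
  by_cases hi : i < p.length
  · have hget : p[i]? = some p[i] := List.getElem?_eq_getElem hi
    by_cases hc : p[i] = c
    · simp [hi, hc]
    · have hcs : ¬ c = p[i] := fun h => hc h.symm
      simp [hi, hc, hcs]
  · have : p[i]? = none := List.getElem?_eq_none (by omega)
    simp [hi]
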